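-- pv_equiv track=rewrite | github.com/hshziwo/Python-Team-Notes | 프로그래머스 기출문제/실전문제/5번.py | solution
-- ===== SOURCE A (Python) =====
-- def solution(n):
--     answer = 0
--
--     while n > 0:
--         # 5로 나눠질때까지 -3을 빼주면서 카운팅하고 5로 나눠지는 순간 나눌 수 있는 몫을 카운트에 더하고 멈추면 정답
--         if n % 5 == 0:
--             answer += n // 5
--             break
--         else:
--             n -= 3
--             answer += 1
--
--     if n < 0:
--         return -1
--     else:
--         return answer
-- ===== SOURCE B (Python) =====
-- def solution(n):
--     if n < 0:
--         return -1
--     k = (2 * n) % 5          # unique count of 3s mod 5 (2 is the inverse of 3 mod 5)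
--     if 3 * k <= n:
--         return k + (n - 3 * k) // 5
--     return -1
-- ===== Notes on version B (the rewrite author's own statement) =====
-- stated objective: simpler
-- what changed: Replaced the subtract-3-until-divisible-by-5 loop with a closed form: the number of 3s is k=(2n)%5 (2 being 3's inverse mod 5), so return k+(n-3k)//5 when 3k<=n, else -1.
import Mathlib
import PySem

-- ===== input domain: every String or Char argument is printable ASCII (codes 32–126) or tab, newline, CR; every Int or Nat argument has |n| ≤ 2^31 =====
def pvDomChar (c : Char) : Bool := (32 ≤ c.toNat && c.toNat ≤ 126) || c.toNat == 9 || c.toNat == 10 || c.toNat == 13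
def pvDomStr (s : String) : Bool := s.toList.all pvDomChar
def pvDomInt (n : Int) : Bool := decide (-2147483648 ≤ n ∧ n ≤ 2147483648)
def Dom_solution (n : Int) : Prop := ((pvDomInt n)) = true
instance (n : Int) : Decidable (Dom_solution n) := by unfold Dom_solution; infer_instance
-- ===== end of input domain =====

-- B replaces A's subtract-3-until-divisible-by-5 loop with the closed form k = (2n) % 5; simpler, same O(1) cost.

-- ===== PORT A =====
-- the while loop of A: returns the final (n, answer) state
def solutionLoop (n answer : Int) : Int × Int :=
  if _h : n > 0 then
    if PySem.Int.mod n 5 = 0 then (n, answer + PySem.Int.floordiv n 5)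
    else solutionLoop (n - 3) (answer + 1)
  else (n, answer)
termination_by n.toNat
decreasing_by omega

def solution (n : Int) : Int :=
  let r := solutionLoop n 0
  if r.1 < 0 then -1 else r.2

-- ===== PORT B =====
def solution_alt (n : Int) : Int :=
  if n < 0 then -1
  else
    let k := PySem.Int.mod (2 * n) 5
    if 3 * k ≤ n then k + PySem.Int.floordiv (n - 3 * k) 5
    else -1

-- ===== PRECONDITION & SPEC =====
def Spec_solution (n : Int) (out : Int) : Prop := out = solution_alt n
instance (n : Int) (out : Int) : Decidable (Spec_solution n out) := by unfold Spec_solution; infer_instance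

-- ===== CLAIM (what is proved, stated in full; the proofs are below) =====
def Claim_equal_solution : Prop := ∀ (n : Int), Dom_solution n → Spec_solution n (solution n)

-- ===== LEMMAS AND PROOFS =====

-- the final value of A, characterised in closed form, for any accumulator
theorem solutionLoop_closed (n answer : Int) :
    (if (solutionLoop n answer).1 < 0 then -1 else (solutionLoop n answer).2) =
      (if 0 ≤ n ∧ 3 * ((2 * n) % 5) ≤ n
       then answer + (2 * n) % 5 + (n - 3 * ((2 * n) % 5)) / 5
       else -1) := by
  induction n, answer using solutionLoop.induct with
  | case1 n answer hpos hmod =>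
    -- n > 0, n % 5 = 0 : loop breaks with answer + n // 5
    rw [solutionLoop, dif_pos hpos, if_pos hmod]
    rw [PySem.Int.mod_eq_emod_of_pos (by norm_num)] at hmod
    rw [PySem.Int.floordiv_eq_ediv_of_pos (by norm_num)]
    have h2 : (2 * n) % 5 = 0 := by omega
    simp only [h2]
    have : ¬ n < 0 := by omega
    rw [if_neg this, if_pos (by omega)]
    ring_nf
  | case2 n answer hpos hmod ih =>
    -- n > 0, n % 5 ≠ 0 : one subtraction step
    rw [solutionLoop, dif_pos hpos, if_neg hmod]
    rw [ih]
    rw [PySem.Int.mod_eq_emod_of_pos (by norm_num)] at hmod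
    have hr : n % 5 = 1 ∨ n % 5 = 2 ∨ n % 5 = 3 ∨ n % 5 = 4 := by omega
    have h1 : (2 * n) % 5 = (2 * (n - 3)) % 5 + 1 := by
      rcases hr with h | h | h | h <;> omega
    split_ifs with h2 h3 h3 <;> omega
  | case3 n answer hpos =>
    -- n ≤ 0 : loop exits with state (n, answer)
    rw [solutionLoop, dif_neg hpos]
    by_cases h0 : n < 0
    · rw [if_pos h0, if_neg (by omega)]
    · have hn : n = 0 := by omega
      subst hn
      norm_num

-- ===== VERDICT (by name: the statement is the Claim_ definition above) =====
theorem solution_spec : Claim_equal_solution := by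
  intro n _
  unfold Spec_solution solution solution_alt
  rw [show (let r := solutionLoop n 0; if r.1 < 0 then -1 else r.2) =
        (if (solutionLoop n 0).1 < 0 then -1 else (solutionLoop n 0).2) from rfl,
      solutionLoop_closed]
  simp only [PySem.Int.mod_eq_emod_of_pos (show (0:Int) < 5 by norm_num),
      PySem.Int.floordiv_eq_ediv_of_pos (show (0:Int) < 5 by norm_num)]
  have hk := Int.emod_nonneg (2 * n) (show (5:Int) ≠ 0 by norm_num)
  split_ifs with h1 h2 h2 <;> omega
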